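-- pv_equiv track=rewrite | github.com/ubercareerprep2019/Assignment-1-Tenzin-Wangpo- | part2.py | isStringPermutation
-- ===== SOURCE A (Python) =====
-- def allElementInHashT(str):
--     dictStr = dict()
--     for element in str:
--         if element not in dictStr:
--             dictStr[element] = 1
--         else:
--             dictStr[element] += 1
--     return dictStr
--
-- def isStringPermutation(s1,  s2):
--     if len(s1) != len(s2):
--         return False
--
--     #since both string length is not same so if one string length is 0, then other should be 0
--     if len(s1) == 0:
--         return True
--
--     dictStr2 = allElementInHashT(s2)
--
--     for char in s1:
--         if char not in dictStr2:
--             return False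
--         else:
--             dictStr2[char] -= 1
--             # if dict value become 0, then delete the that key value pair
--             if dictStr2[char] == 0:
--                 del dictStr2[char]
--     return True
-- ===== SOURCE B (Python) =====
-- def isStringPermutation(s1, s2):
--     return sorted(s1) == sorted(s2)
-- ===== Notes on version B (the rewrite author's own statement) =====
-- stated objective: simpler
-- what changed: Replaces the hash-map character counting with decrementing loop (plus explicit length/empty guards) by a one-line order-based comparison: sorted(s1) == sorted(s2).
import Mathlib
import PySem

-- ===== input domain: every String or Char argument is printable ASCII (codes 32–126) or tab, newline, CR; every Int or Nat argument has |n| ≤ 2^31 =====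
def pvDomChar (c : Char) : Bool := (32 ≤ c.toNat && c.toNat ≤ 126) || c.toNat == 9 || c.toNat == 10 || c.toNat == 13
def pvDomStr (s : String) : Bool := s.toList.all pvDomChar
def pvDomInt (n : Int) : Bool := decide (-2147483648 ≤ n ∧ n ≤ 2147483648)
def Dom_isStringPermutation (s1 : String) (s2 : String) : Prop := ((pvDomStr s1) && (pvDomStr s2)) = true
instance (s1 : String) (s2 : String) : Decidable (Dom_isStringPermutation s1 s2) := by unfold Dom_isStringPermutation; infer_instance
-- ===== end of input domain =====

-- B replaces A's hash-map counting/decrementing with a direct sorted-sequence comparison (simpler, not claimed faster).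

-- ===== PORT A =====
def allElementInHashT (str : String) : PySem.Dict Char Int :=
  str.toList.foldl
    (fun dictStr element =>
      if dictStr.contains element = false then dictStr.insert element 1
      else dictStr.modify element 0 (· + 1))
    PySem.Dict.empty

def permLoop : List Char → PySem.Dict Char Int → Bool
  | [], _ => true
  | char :: rest, dictStr2 =>
    if dictStr2.contains char = false then false
    else
      let d' := dictStr2.modify char 0 (· - 1)
      if d'.getD char 0 = 0 then permLoop rest (d'.erase char)
      else permLoop rest d'

def isStringPermutation (s1 : String) (s2 : String) : Bool :=
  if PySem.Str.len s1 ≠ PySem.Str.len s2 then false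
  else if PySem.Str.len s1 = 0 then true
  else permLoop s1.toList (allElementInHashT s2)

-- ===== PORT B =====
def isStringPermutation_alt (s1 : String) (s2 : String) : Bool :=
  decide (PySem.List.sorted s1.toList (fun x => x) false
        = PySem.List.sorted s2.toList (fun x => x) false)

-- ===== PRECONDITION & SPEC =====
def Spec_isStringPermutation (s1 : String) (s2 : String) (out : Bool) : Prop := out = isStringPermutation_alt s1 s2
instance (s1 : String) (s2 : String) (out : Bool) : Decidable (Spec_isStringPermutation s1 s2 out) := by unfold Spec_isStringPermutation; infer_instance

-- ===== CLAIM (what is proved, stated in full; the proofs are below) =====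
def Claim_equal_isStringPermutation : Prop := ∀ (s1 : String) (s2 : String), Dom_isStringPermutation s1 s2 → Spec_isStringPermutation s1 s2 (isStringPermutation s1 s2)

-- ===== LEMMAS AND PROOFS =====

-- values stored by A's dict are always strictly positive
def GoodDict (d : PySem.Dict Char Int) : Prop := ∀ c v, d.get? c = some v → 0 < v

theorem goodDict_getD_nonneg {d : PySem.Dict Char Int} (h : GoodDict d) (c : Char) :
    0 ≤ d.getD c 0 := by
  rw [PySem.Dict.getD_eq_get?_getD]
  cases hg : d.get? c with
  | none => simp
  | some v => simpa using le_of_lt (h c v hg)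

-- erase behaves like deletion on lookups (no library lemma for Dict.erase)
theorem get?_erase_self (d : PySem.Dict Char Int) (k : Char) :
    (d.erase k).get? k = none := by
  simp only [PySem.Dict.erase, PySem.Dict.get?, Option.map_eq_none_iff]
  rw [List.find?_eq_none]
  intro p hp
  have := (List.mem_filter.mp hp).2
  simpa using this

theorem get?_erase_of_ne (d : PySem.Dict Char Int) (k c : Char) (h : c ≠ k) :
    (d.erase k).get? c = d.get? c := by
  simp only [PySem.Dict.erase, PySem.Dict.get?]
  congr 1
  induction d.items with
  | nil => rfl
  | cons p t ih =>
    rw [List.filter_cons]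
    by_cases hpk : p.1 = k
    · have hkc : (k == c) = false := by
        rw [beq_eq_false_iff_ne]; exact Ne.symm h
      simp [hpk, List.find?_cons, hkc, ih]
    · cases hpc : (p.1 == c) <;> simp [hpk, List.find?_cons, hpc, ih]

theorem getD_erase (d : PySem.Dict Char Int) (k c : Char) :
    (d.erase k).getD c 0 = if c = k then 0 else d.getD c 0 := by
  by_cases h : c = k
  · simp [h, PySem.Dict.getD_eq_get?_getD, get?_erase_self]
  · simp [h, PySem.Dict.getD_eq_get?_getD, get?_erase_of_ne d k c h]

-- A's hash table counts characters
theorem hashT_step_getD (l : List Char) (d : PySem.Dict Char Int) (c : Char) :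
    (l.foldl (fun dictStr element =>
        if dictStr.contains element = false then dictStr.insert element 1
        else dictStr.modify element 0 (· + 1)) d).getD c 0
      = d.getD c 0 + l.count c := by
  induction l generalizing d with
  | nil => simp
  | cons e t ih =>
    simp only [List.foldl_cons, ih, List.count_cons]
    by_cases hc : d.contains e = false
    · have he0 : d.getD e 0 = 0 := PySem.Dict.getD_of_not_contains d 0 hc
      rw [if_pos hc, PySem.Dict.getD_insert]
      by_cases hce : c = e
      · subst hce; simp [he0]; omega
      · have hec : ¬ e = c := fun h' => hce h'.symm
        simp [hce, hec]
    · rw [if_neg hc, PySem.Dict.getD_modify]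
      by_cases hce : c = e
      · subst hce; simp; omega
      · have hec : ¬ e = c := fun h' => hce h'.symm
        simp [hce, hec]

theorem hashT_getD (s : String) (c : Char) :
    (allElementInHashT s).getD c 0 = s.toList.count c := by
  unfold allElementInHashT
  rw [hashT_step_getD]
  rw [PySem.Dict.getD_empty]
  omega

theorem hashT_good_step (l : List Char) (d : PySem.Dict Char Int) (h : GoodDict d) :
    GoodDict (l.foldl (fun dictStr element =>
        if dictStr.contains element = false then dictStr.insert element 1
        else dictStr.modify element 0 (· + 1)) d) := by
  induction l generalizing d with
  | nil => exact h
  | cons e t ih =>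
    simp only [List.foldl_cons]
    apply ih
    intro c v hv
    by_cases hc : d.contains e = false
    · rw [if_pos hc] at hv
      by_cases hce : c = e
      · subst hce; rw [PySem.Dict.get?_insert_self] at hv
        injection hv with hv; omega
      · rw [PySem.Dict.get?_insert_of_ne d 1 hce] at hv
        exact h c v hv
    · rw [if_neg hc] at hv
      rw [PySem.Dict.modify] at hv
      by_cases hce : c = e
      · subst hce; rw [PySem.Dict.get?_insert_self] at hv
        have := goodDict_getD_nonneg h c
        injection hv with hv; omega
      · rw [PySem.Dict.get?_insert_of_ne _ _ hce] at hv
        exact h c v hv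

theorem hashT_good (s : String) : GoodDict (allElementInHashT s) := by
  unfold allElementInHashT
  apply hashT_good_step
  intro c v hv
  simp [PySem.Dict.get?_empty] at hv

-- the main-loop characterisation: A's decrementing loop checks count inclusion
theorem permLoop_iff (cs : List Char) (d : PySem.Dict Char Int) (hg : GoodDict d) :
    permLoop cs d = true ↔ ∀ x, (cs.count x : Int) ≤ d.getD x 0 := by
  induction cs generalizing d with
  | nil =>
    simp only [permLoop, List.count_nil, true_iff]
    intro x
    simpa using goodDict_getD_nonneg hg x
  | cons c rest ih =>
    simp only [permLoop]
    by_cases hc : d.contains c = false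
    · have hc0 : d.getD c 0 = 0 := PySem.Dict.getD_of_not_contains d 0 hc
      rw [if_pos hc]
      simp only [Bool.false_eq_true, false_iff, not_forall]
      refine ⟨c, ?_⟩
      simp [hc0, List.count_cons]
    · rw [if_neg hc]
      have hv : ∃ v, d.get? c = some v := by
        cases hgc : d.get? c with
        | none =>
          rw [PySem.Dict.get?_eq_none_iff_contains] at hgc
          exact absurd hgc hc
        | some v => exact ⟨v, rfl⟩
      obtain ⟨v, hvq⟩ := hv
      have hvpos : 0 < v := hg c v hvq
      have hdc : d.getD c 0 = v := PySem.Dict.getD_of_get?_eq_some d 0 hvq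
      have hmod_self : (d.modify c 0 (· - 1)).getD c 0 = v - 1 := by
        rw [PySem.Dict.getD_modify_self, hdc]
      have hmod_ne : ∀ x, x ≠ c → (d.modify c 0 (· - 1)).getD x 0 = d.getD x 0 :=
        fun x hx => PySem.Dict.getD_modify_of_ne d 0 _ hx
      have hcount : ∀ (dd : PySem.Dict Char Int),
          (∀ x, dd.getD x 0 = d.getD x 0 - (if x = c then 1 else 0)) →
          ((∀ x, (rest.count x : Int) ≤ dd.getD x 0)
            ↔ ∀ x, ((c :: rest).count x : Int) ≤ d.getD x 0) := by
        intro dd hdd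
        constructor
        · intro h x
          have h1 := h x
          rw [hdd x] at h1
          by_cases hxc : x = c <;>
            [skip; have hcx : ¬ c = x := fun h' => hxc h'.symm] <;>
            simp_all [List.count_cons] <;> omega
        · intro h x
          have h1 := h x
          rw [hdd x]
          by_cases hxc : x = c <;>
            [skip; have hcx : ¬ c = x := fun h' => hxc h'.symm] <;>
            simp_all [List.count_cons] <;> omega
      by_cases hz : v - 1 = 0
      · rw [hmod_self, if_pos hz]
        have hgood : GoodDict ((d.modify c 0 (· - 1)).erase c) := by
          intro x w hw
          by_cases hxc : x = c
          · rw [hxc, get?_erase_self] at hw; cases hw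
          · rw [get?_erase_of_ne _ _ _ hxc] at hw
            rw [PySem.Dict.modify, PySem.Dict.get?_insert_of_ne _ _ hxc] at hw
            exact hg x w hw
        rw [ih _ hgood]
        apply hcount
        intro x
        rw [getD_erase]
        by_cases hxc : x = c
        · simp [hxc]; omega
        · rw [if_neg hxc, if_neg hxc, hmod_ne x hxc]; omega
      · rw [hmod_self, if_neg hz]
        have hgood : GoodDict (d.modify c 0 (· - 1)) := by
          intro x w hw
          by_cases hxc : x = c
          · subst hxc
            rw [PySem.Dict.modify, PySem.Dict.get?_insert_self] at hw
            injection hw with hw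
            rw [hdc] at hw
            omega
          · rw [PySem.Dict.modify, PySem.Dict.get?_insert_of_ne _ _ hxc] at hw
            exact hg x w hw
        rw [ih _ hgood]
        apply hcount
        intro x
        by_cases hxc : x = c
        · subst hxc; rw [hmod_self]; simp; omega
        · rw [hmod_ne x hxc, if_neg hxc]; omega

-- count inclusion plus equal length is permutation
theorem count_le_length_eq_perm (l1 l2 : List Char)
    (hlen : l1.length = l2.length)
    (h : ∀ x, (l1.count x : Int) ≤ (l2.count x : Int)) : l1.Perm l2 := by
  rw [← Multiset.coe_eq_coe]
  have hle : (l1 : Multiset Char) ≤ (l2 : Multiset Char) := by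
    rw [Multiset.le_iff_count]
    intro a
    have := h a
    simp only [Multiset.coe_count]
    exact_mod_cast this
  exact Multiset.eq_of_le_of_card_le hle (by simpa using hlen.ge)

-- B's truth value is permutation
theorem alt_iff (s1 s2 : String) :
    isStringPermutation_alt s1 s2 = true ↔ s1.toList.Perm s2.toList := by
  unfold isStringPermutation_alt
  rw [decide_eq_true_iff]
  exact PySem.List.sorted_id_eq_sorted_id_iff_perm s1.toList s2.toList

-- ===== VERDICT (by name: the statement is the Claim_ definition above) =====
theorem isStringPermutation_spec : Claim_equal_isStringPermutation := by
  intro s1 s2 _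
  unfold Spec_isStringPermutation
  rw [Bool.eq_iff_iff, alt_iff]
  unfold isStringPermutation
  simp only [PySem.Str.len_eq]
  by_cases hlen : s1.toList.length = s2.toList.length
  · by_cases h0 : s1.toList.length = 0
    · have h1 : s1.toList = [] := List.length_eq_zero_iff.mp h0
      have h2 : s2.toList = [] := List.length_eq_zero_iff.mp (hlen ▸ h0)
      simp [h1, h2]
    · rw [if_neg (by simp [hlen]), if_neg (by exact_mod_cast h0)]
      rw [permLoop_iff _ _ (hashT_good s2)]
      constructor
      · intro h
        apply count_le_length_eq_perm _ _ hlen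
        intro x
        have := h x
        rw [hashT_getD] at this
        exact_mod_cast this
      · intro hp x
        rw [hashT_getD]
        exact_mod_cast le_of_eq (hp.count_eq x)
  · rw [if_pos (by simpa using hlen)]
    simp only [Bool.false_eq_true, false_iff]
    intro hp
    exact hlen hp.length_eq
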